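-- pv_equiv track=rewrite | github.com/robertmckean/rag | src/rag/patterns/aliases.py | alias_conflicts_in_phase
-- ===== SOURCE A (Python) =====
-- ENTITY_ALIASES: dict[str, str] = {
--     "Mark": "Marc",
-- }
--
-- def alias_conflicts_in_phase(phase_entities: set[str]) -> set[str]:
--     """Identify canonical names that have conflicting variants in a phase.
--
--     Returns the set of canonical names for which two or more distinct variant
--     spellings both appear in *phase_entities*.  These canonical names should
--     NOT be merged — the co-occurrence suggests the variants are different
--     entities despite the alias map entry.
--     """
--     # Build canonical -> set of variants present in this phase.
--     canonical_variants: dict[str, set[str]] = {}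
--     for entity in phase_entities:
--         canonical = ENTITY_ALIASES.get(entity)
--         if canonical is None:
--             continue
--         # The variant mapped to a canonical form.  Track it.
--         canonical_variants.setdefault(canonical, set()).add(entity)
--         # Also check if the canonical form itself appears.
--         if canonical in phase_entities:
--             canonical_variants[canonical].add(canonical)
--
--     # A canonical name with the canonical form itself in the phase also needs
--     # to be tracked even if no variant triggered the above loop.
--     for entity in phase_entities:
--         if entity in ENTITY_ALIASES.values():
--             # This entity IS a canonical form.  Check if any variant is present.
--             for variant, canon in ENTITY_ALIASES.items():
--                 if canon == entity and variant in phase_entities: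
--                     canonical_variants.setdefault(entity, set()).add(entity)
--                     canonical_variants[entity].add(variant)
--
--     return {canon for canon, variants in canonical_variants.items() if len(variants) >= 2}
-- ===== SOURCE B (Python) =====
-- ENTITY_ALIASES: dict[str, str] = {
--     "Mark": "Marc",
-- }
--
-- def alias_conflicts_in_phase(phase_entities: set[str]) -> set[str]:
--     """Canonical names with >= 2 distinct spellings present in the phase.
--
--     Group the alias table once into canonical -> variants, then for each
--     canonical count how many of {canonical} | variants are present.
--     """
--     groups: dict[str, set[str]] = {}
--     for variant, canonical in ENTITY_ALIASES.items():
--         groups.setdefault(canonical, set()).add(variant)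
--     conflicts: set[str] = set()
--     for canonical, variants in groups.items():
--         present = sum(1 for name in variants | {canonical} if name in phase_entities)
--         if present >= 2:
--             conflicts.add(canonical)
--     return conflicts
-- ===== Notes on version B (the rewrite author's own statement) =====
-- stated objective: faster
-- what changed: B loops once over the alias table grouped canonical->variants and counts present spellings per group with O(1) set membership, instead of A's two passes over phase_entities with setdefault bookkeeping and a nested scan of the alias items.
import Mathlib
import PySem

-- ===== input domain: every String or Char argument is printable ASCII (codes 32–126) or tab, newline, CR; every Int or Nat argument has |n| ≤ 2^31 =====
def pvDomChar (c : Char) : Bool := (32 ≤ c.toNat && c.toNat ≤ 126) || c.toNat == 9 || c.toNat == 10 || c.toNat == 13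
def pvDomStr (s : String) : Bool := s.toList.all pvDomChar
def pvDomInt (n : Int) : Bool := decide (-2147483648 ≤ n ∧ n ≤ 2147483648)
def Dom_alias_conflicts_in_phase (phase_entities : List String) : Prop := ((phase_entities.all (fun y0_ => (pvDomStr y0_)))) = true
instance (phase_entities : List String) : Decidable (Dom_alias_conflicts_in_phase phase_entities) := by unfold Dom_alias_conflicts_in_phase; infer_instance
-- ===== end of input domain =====

-- B groups the alias table canonical->variants and counts present spellings per group,
-- replacing A's two passes over phase_entities; objective: simpler decomposition.
-- (Python returns sets; both ports return the distinct elements as a List.)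

-- ===== PORT A =====
def ENTITY_ALIASES : PySem.Dict String String := PySem.Dict.ofList [("Mark", "Marc")]

-- first loop body: setdefault(canonical, set()).add(entity), then add canonical if present
def aStep1 (pe : List String) (cv : PySem.Dict String (PySem.Set String)) (entity : String) :
    PySem.Dict String (PySem.Set String) :=
  match ENTITY_ALIASES.get? entity with
  | none => cv
  | some canonical =>
    let cv := cv.insert canonical (PySem.Set.add (cv.getD canonical PySem.Set.empty) entity)
    if pe.contains canonical then
      cv.insert canonical (PySem.Set.add (cv.getD canonical PySem.Set.empty) canonical)
    else cv

-- second loop body: if entity is a canonical value, scan the alias items for present variants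
def aStep2 (pe : List String) (cv : PySem.Dict String (PySem.Set String)) (entity : String) :
    PySem.Dict String (PySem.Set String) :=
  if ENTITY_ALIASES.values.contains entity then
    ENTITY_ALIASES.items.foldl (fun cv p =>
      if p.2 == entity && pe.contains p.1 then
        let cv := cv.insert entity (PySem.Set.add (cv.getD entity PySem.Set.empty) entity)
        cv.insert entity (PySem.Set.add (cv.getD entity PySem.Set.empty) p.1)
      else cv) cv
  else cv

def alias_conflicts_in_phase (phase_entities : List String) : List String :=
  let cv1 := phase_entities.foldl (aStep1 phase_entities) PySem.Dict.empty
  let cv2 := phase_entities.foldl (aStep2 phase_entities) cv1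
  PySem.Set.ofList ((cv2.items.filter (fun p => 2 ≤ PySem.Set.len p.2)).map Prod.fst)

-- ===== PORT B =====
def bGroups : PySem.Dict String (PySem.Set String) :=
  ENTITY_ALIASES.items.foldl
    (fun g p => g.insert p.2 (PySem.Set.add (g.getD p.2 PySem.Set.empty) p.1))
    PySem.Dict.empty

def alias_conflicts_in_phase_alt (phase_entities : List String) : List String :=
  bGroups.items.foldl
    (fun conflicts p =>
      let present :=
        (PySem.Set.union p.2 (PySem.Set.ofList [p.1])).countP
          (fun name => phase_entities.contains name)
      if 2 ≤ present then PySem.Set.add conflicts p.1 else conflicts)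
    PySem.Set.empty

-- ===== PRECONDITION & SPEC =====
def Spec_alias_conflicts_in_phase (phase_entities : List String) (out : List String) : Prop := out = alias_conflicts_in_phase_alt phase_entities
instance (phase_entities : List String) (out : List String) : Decidable (Spec_alias_conflicts_in_phase phase_entities out) := by unfold Spec_alias_conflicts_in_phase; infer_instance

-- ===== CLAIM (what is proved, stated in full; the proofs are below) =====
def Claim_equal_alias_conflicts_in_phase : Prop := ∀ (phase_entities : List String), Dom_alias_conflicts_in_phase phase_entities → Spec_alias_conflicts_in_phase phase_entities (alias_conflicts_in_phase phase_entities)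

-- ===== LEMMAS AND PROOFS =====

-- the alias table is a literal: its lookup, values and items compute
theorem EA_get (e : String) :
    ENTITY_ALIASES.get? e = if e = "Mark" then some "Marc" else none := by
  by_cases he : e = "Mark"
  · subst he; decide
  · simp [ENTITY_ALIASES, PySem.Dict.ofList, PySem.Dict.update, PySem.Dict.insert,
      PySem.Dict.empty, PySem.Dict.get?, PySem.Dict.contains, List.foldl, he, Ne.symm he]

-- aStep1 only acts on "Mark" (the only alias-table key)
theorem aStep1_of_ne (pe : List String) (cv : PySem.Dict String (PySem.Set String))
    (e : String) (h : e ≠ "Mark") : aStep1 pe cv e = cv := by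
  simp [aStep1, EA_get, h]

theorem aStep1_idem (pe : List String) (cv : PySem.Dict String (PySem.Set String)) :
    aStep1 pe (aStep1 pe cv "Mark") "Mark" = aStep1 pe cv "Mark" := by
  by_cases hm : "Marc" ∈ pe <;>
    simp [aStep1, EA_get, hm, PySem.Dict.getD_insert_self, PySem.Dict.insert_insert_self,
      PySem.Set.add_of_mem, PySem.Set.mem_add]

theorem foldl_aStep1 (pe l : List String) (cv : PySem.Dict String (PySem.Set String)) :
    l.foldl (aStep1 pe) cv = if "Mark" ∈ l then aStep1 pe cv "Mark" else cv := by
  induction l generalizing cv with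
  | nil => simp
  | cons a l ih =>
    by_cases ha : a = "Mark"
    · subst ha
      rw [List.foldl_cons, ih, aStep1_idem]
      simp
    · rw [List.foldl_cons, aStep1_of_ne pe cv a ha, ih]
      simp [List.mem_cons, Ne.symm ha]

-- aStep2 only acts on "Marc" (the only alias-table value)
theorem aStep2_of_ne (pe : List String) (cv : PySem.Dict String (PySem.Set String))
    (e : String) (h : e ≠ "Marc") : aStep2 pe cv e = cv := by
  simp [aStep2, show ENTITY_ALIASES.values = ["Marc"] from rfl, h]

theorem aStep2_idem (pe : List String) (cv : PySem.Dict String (PySem.Set String)) :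
    aStep2 pe (aStep2 pe cv "Marc") "Marc" = aStep2 pe cv "Marc" := by
  simp only [aStep2, show ENTITY_ALIASES.values = ["Marc"] from rfl,
    show ENTITY_ALIASES.items = [("Mark", "Marc")] from rfl]
  by_cases hm : "Mark" ∈ pe <;>
    simp [List.foldl, hm, PySem.Dict.getD_insert_self, PySem.Dict.insert_insert_self,
      PySem.Set.add_of_mem, PySem.Set.mem_add]

theorem foldl_aStep2 (pe l : List String) (cv : PySem.Dict String (PySem.Set String)) :
    l.foldl (aStep2 pe) cv = if "Marc" ∈ l then aStep2 pe cv "Marc" else cv := by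
  induction l generalizing cv with
  | nil => simp
  | cons a l ih =>
    by_cases ha : a = "Marc"
    · subst ha
      rw [List.foldl_cons, ih, aStep2_idem]
      simp
    · rw [List.foldl_cons, aStep2_of_ne pe cv a ha, ih]
      simp [List.mem_cons, Ne.symm ha]

-- ===== VERDICT (by name: the statement is the Claim_ definition above) =====
theorem alias_conflicts_in_phase_spec : Claim_equal_alias_conflicts_in_phase := by
  intro pe _
  show alias_conflicts_in_phase pe = alias_conflicts_in_phase_alt pe
  by_cases h1 : "Mark" ∈ pe <;> by_cases h2 : "Marc" ∈ pe <;>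
    simp [alias_conflicts_in_phase, alias_conflicts_in_phase_alt, foldl_aStep1, foldl_aStep2,
      aStep1, aStep2, bGroups, h1, h2, List.contains_eq_mem,
      show ENTITY_ALIASES.items = [("Mark", "Marc")] from rfl,
      show ENTITY_ALIASES.values = ["Marc"] from rfl,
      List.foldl, List.countP, List.countP.go,
      PySem.Dict.insert, PySem.Dict.empty, PySem.Dict.items, PySem.Dict.getD, PySem.Dict.get?,
      PySem.Dict.contains, PySem.Set.union, PySem.Set.update, PySem.Set.add, PySem.Set.ofList,
      PySem.Set.contains, PySem.Set.len, PySem.Set.empty]
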